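-- pv_equiv track=rewrite | github.com/DavitHovhannisyan/Sudoku-Solver | SudokuSolver2017.py | Check_axis
-- ===== SOURCE A (Python) =====
-- def Check_axis(axis_Values):
--     i=0
--     for x in axis_Values:
--         for x in range(10)[1:]:
--             try:
--                 if axis_Values[i].count(x)>1:
--                     return True
--             except:
--                 pass
--         i+=1
--     return False
-- ===== SOURCE B (Python) =====
-- def Check_axis(axis_Values):
--     for row in axis_Values:
--         seen = set()
--         for v in row:
--             if v in range(1, 10):
--                 if v in seen:
--                     return True
--                 seen.add(v)
--     return False
-- ===== Notes on version B (the rewrite author's own statement) =====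
-- stated objective: simpler
-- what changed: B scans each row once with a seen-set and flags a 1-9 digit on its second occurrence, instead of A's per-row loop over all nine digits each calling row.count.
import Mathlib
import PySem

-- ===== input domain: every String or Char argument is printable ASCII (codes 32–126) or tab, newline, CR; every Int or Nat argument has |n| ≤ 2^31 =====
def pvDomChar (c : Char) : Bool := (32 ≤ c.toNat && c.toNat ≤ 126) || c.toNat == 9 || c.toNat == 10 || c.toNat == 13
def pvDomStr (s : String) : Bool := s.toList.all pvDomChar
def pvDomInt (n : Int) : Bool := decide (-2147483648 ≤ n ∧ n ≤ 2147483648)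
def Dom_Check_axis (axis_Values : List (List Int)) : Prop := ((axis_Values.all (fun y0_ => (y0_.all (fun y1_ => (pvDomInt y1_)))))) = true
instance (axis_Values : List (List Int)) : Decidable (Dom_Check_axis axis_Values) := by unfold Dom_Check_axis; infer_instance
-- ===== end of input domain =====

-- B replaces A's per-row loop over the nine digits (each calling row.count) by one
-- pass over the row's elements with a seen-set; same return value, simpler.

-- ===== PORT A =====
-- inner 'for x in range(10)[1:]' body: try row lookup, count x, except: pass (pyGet? none ⇒ false)
def pvInnerA (axis : List (List Int)) (i : Int) : Bool :=
  (PySem.List.pyRange 1 10 1).any fun x =>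
    match PySem.List.pyGet? axis i with
    | some row => decide (PySem.List.count row x > 1)
    | none => false

-- outer 'for x in axis_Values' with counter i, early return True
def pvGoA (axis : List (List Int)) : List (List Int) → Int → Bool
  | [], _ => false
  | _ :: rest, i => if pvInnerA axis i then true else pvGoA axis rest (i + 1)

def Check_axis (axis_Values : List (List Int)) : Bool :=
  pvGoA axis_Values axis_Values 0

-- ===== PORT B =====
-- single pass over a row maintaining 'seen'; duplicate 1..9 digit ⇒ True
def pvRowDup : List Int → PySem.Set Int → Bool
  | [], _ => false
  | v :: rest, seen =>
    if 1 ≤ v ∧ v < 10 then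
      if PySem.Set.contains seen v then true
      else pvRowDup rest (PySem.Set.add seen v)
    else pvRowDup rest seen

def Check_axis_alt (axis_Values : List (List Int)) : Bool :=
  axis_Values.any fun row => pvRowDup row PySem.Set.empty

-- ===== PRECONDITION & SPEC =====
def Spec_Check_axis (axis_Values : List (List Int)) (out : Bool) : Prop := out = Check_axis_alt axis_Values
instance (axis_Values : List (List Int)) (out : Bool) : Decidable (Spec_Check_axis axis_Values out) := by unfold Spec_Check_axis; infer_instance

-- ===== CLAIM (what is proved, stated in full; the proofs are below) =====
def Claim_equal_Check_axis : Prop := ∀ (axis_Values : List (List Int)), Dom_Check_axis axis_Values → Spec_Check_axis axis_Values (Check_axis axis_Values)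

-- ===== LEMMAS AND PROOFS =====

-- characterisation of A's per-row test
theorem pvInnerA_iff (axis : List (List Int)) (i : Int) (row : List Int)
    (h : PySem.List.pyGet? axis i = some row) :
    pvInnerA axis i = true ↔ ∃ v : Int, 1 ≤ v ∧ v < 10 ∧ 2 ≤ row.count v := by
  simp only [pvInnerA, h, List.any_eq_true, PySem.List.mem_pyRange_one]
  constructor
  · rintro ⟨v, ⟨h1, h2⟩, hc⟩
    exact ⟨v, h1, h2, by simpa [PySem.List.count] using hc⟩
  · rintro ⟨v, h1, h2, hc⟩
    exact ⟨v, ⟨h1, h2⟩, by simpa [PySem.List.count] using hc⟩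

-- characterisation of B's per-row scan (generalised over the seen-set)
theorem pvRowDup_iff (rest : List Int) : ∀ (seen : PySem.Set Int),
    pvRowDup rest seen = true ↔
      ∃ v : Int, 1 ≤ v ∧ v < 10 ∧ v ∈ rest ∧ (v ∈ seen ∨ 2 ≤ rest.count v) := by
  induction rest with
  | nil => intro seen; simp [pvRowDup]
  | cons x r ih =>
    intro seen
    by_cases hx : 1 ≤ x ∧ x < 10
    · by_cases hs : x ∈ seen
      · have hct : PySem.Set.contains seen x = true := (PySem.Set.contains_iff _ _).mpr hs
        simp only [pvRowDup, if_pos hx, hct, if_true, true_iff]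
        exact ⟨x, hx.1, hx.2, List.mem_cons_self, Or.inl hs⟩
      · have hcf : PySem.Set.contains seen x = false := by
          cases hc : PySem.Set.contains seen x
          · rfl
          · exact absurd ((PySem.Set.contains_iff _ _).mp hc) hs
        simp only [pvRowDup, if_pos hx, hcf, Bool.false_eq_true, if_false]
        rw [ih]
        constructor
        · rintro ⟨v, h1, h2, hm, hor⟩
          rcases hor with hmem | hcnt
          · rcases (PySem.Set.mem_add _ _ _).mp hmem with hmem | rfl
            · exact ⟨v, h1, h2, List.mem_cons_of_mem _ hm, Or.inl hmem⟩
            · refine ⟨v, h1, h2, List.mem_cons_self, Or.inr ?_⟩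
              have h1c : 1 ≤ r.count v := List.count_pos_iff.mpr hm
              rw [List.count_cons_self]; omega
          · refine ⟨v, h1, h2, List.mem_cons_of_mem _ hm, Or.inr ?_⟩
            by_cases hvx : v = x
            · subst hvx; rw [List.count_cons_self]; omega
            · rw [List.count_cons_of_ne (Ne.symm hvx)]; exact hcnt
        · rintro ⟨v, h1, h2, hm, hor⟩
          by_cases hvx : v = x
          · subst hvx
            rcases hor with hmem | hcnt
            · exact absurd hmem hs
            · rw [List.count_cons_self] at hcnt
              have h1c : 1 ≤ r.count v := by omega
              refine ⟨v, h1, h2, List.count_pos_iff.mp h1c, Or.inl ?_⟩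
              exact (PySem.Set.mem_add _ _ _).mpr (Or.inr rfl)
          · have hm' : v ∈ r := by
              rcases List.mem_cons.mp hm with h' | h'
              · exact absurd h' hvx
              · exact h'
            rcases hor with hmem | hcnt
            · exact ⟨v, h1, h2, hm', Or.inl ((PySem.Set.mem_add _ _ _).mpr (Or.inl hmem))⟩
            · rw [List.count_cons_of_ne (Ne.symm hvx)] at hcnt
              exact ⟨v, h1, h2, hm', Or.inr hcnt⟩
    · simp only [pvRowDup, if_neg hx]
      rw [ih]
      constructor
      · rintro ⟨v, h1, h2, hm, hor⟩
        refine ⟨v, h1, h2, List.mem_cons_of_mem _ hm, ?_⟩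
        rcases hor with hmem | hcnt
        · exact Or.inl hmem
        · refine Or.inr ?_
          by_cases hvx : v = x
          · subst hvx; rw [List.count_cons_self]; omega
          · rw [List.count_cons_of_ne (Ne.symm hvx)]; exact hcnt
      · rintro ⟨v, h1, h2, hm, hor⟩
        have hvx : v ≠ x := by rintro rfl; exact hx ⟨h1, h2⟩
        have hm' : v ∈ r := by
          rcases List.mem_cons.mp hm with h' | h'
          · exact absurd h' hvx
          · exact h'
        rcases hor with hmem | hcnt
        · exact ⟨v, h1, h2, hm', Or.inl hmem⟩
        · rw [List.count_cons_of_ne (Ne.symm hvx)] at hcnt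
          exact ⟨v, h1, h2, hm', Or.inr hcnt⟩

theorem pvRowDup_empty_iff (row : List Int) :
    pvRowDup row PySem.Set.empty = true ↔ ∃ v : Int, 1 ≤ v ∧ v < 10 ∧ 2 ≤ row.count v := by
  rw [pvRowDup_iff]
  constructor
  · rintro ⟨v, h1, h2, _, hor⟩
    rcases hor with hmem | hcnt
    · simp [PySem.Set.empty] at hmem
    · exact ⟨v, h1, h2, hcnt⟩
  · rintro ⟨v, h1, h2, hcnt⟩
    exact ⟨v, h1, h2, List.count_pos_iff.mp (by omega), Or.inr hcnt⟩

theorem pvRow_eq (axis : List (List Int)) (i : Int) (row : List Int)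
    (h : PySem.List.pyGet? axis i = some row) :
    pvInnerA axis i = pvRowDup row PySem.Set.empty := by
  have hiff : pvInnerA axis i = true ↔ pvRowDup row PySem.Set.empty = true :=
    (pvInnerA_iff axis i row h).trans (pvRowDup_empty_iff row).symm
  cases hb : pvRowDup row PySem.Set.empty
  · cases ha : pvInnerA axis i
    · rfl
    · rw [hiff.mp ha] at hb; cases hb
  · exact hiff.mpr hb

-- the outer loop of A, with the index invariant
theorem pvGoA_eq (axis : List (List Int)) :
    ∀ (rest : List (List Int)) (n : Nat), axis.drop n = rest →
      pvGoA axis rest (n : Int) = rest.any fun row => pvRowDup row PySem.Set.empty := by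
  intro rest
  induction rest with
  | nil => intro n _; simp [pvGoA]
  | cons row rest' ih =>
    intro n hdrop
    have hget : PySem.List.pyGet? axis (n : Int) = some row := by
      rw [PySem.List.pyGet?_natCast, ← List.head?_drop, hdrop]; rfl
    have hdrop' : axis.drop (n + 1) = rest' := by
      rw [← List.tail_drop, hdrop]; rfl
    simp only [pvGoA, List.any_cons]
    rw [pvRow_eq axis (n : Int) row hget]
    have hcast : (n : Int) + 1 = ((n + 1 : Nat) : Int) := by push_cast; ring
    rw [hcast, ih (n + 1) hdrop']
    cases pvRowDup row PySem.Set.empty <;> simp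

-- ===== VERDICT (by name: the statement is the Claim_ definition above) =====
theorem Check_axis_spec : Claim_equal_Check_axis := by
  intro axis _
  unfold Spec_Check_axis Check_axis Check_axis_alt
  have h0 : ((0 : Nat) : Int) = (0 : Int) := rfl
  rw [← h0, pvGoA_eq axis axis 0 (by simp)]
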